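-- pv_equiv track=rewrite | github.com/hyobin96/PCCP_Study | #7. 2025 프로그래머스 코드챌린지 1차 예선/장효빈/problem3_지게차와_크레인.py | solution
-- ===== SOURCE A (Python) =====
-- from collections import deque
--
-- def solution(storage, requests):
--
--     n, m = len(storage), len(storage[0])
--
--     grid = []
--
--     for string in storage:
--         grid.append(list(string))
--
--     drs, dcs = (-1, 1, 0, 0), (0, 0, -1, 1)
--     in_range = lambda r, c: 0 <= r < n and 0 <= c < m
--
--     def bfs(start):
--         q = deque()
--         visited = [[0] * m for _ in range(n)]
--         q.append(start)
--         r, c = start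
--         visited[r][c] = 1
--
--         while q:
--             r, c = q.popleft()
--
--             for dr, dc in zip(drs, dcs):
--                 nr, nc = r + dr, c + dc
--                 if not in_range(nr, nc):
--                     return True
--
--                 if not grid[nr][nc] and not visited[nr][nc]:
--                     q.append((nr, nc))
--                     visited[nr][nc] = 1
--
--
--     for req in requests:
--         l = []
--
--         if len(req) == 1:
--             for r in range(n):
--                 for c in range(m):
--                     if grid[r][c] == req and bfs((r, c)):
--                          l.append((r, c))
--
--             for r, c in l:
--                 grid[r][c] = 0
--
--         else:
--             for r in range(n):
--                 for c in range(m):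
--                     if grid[r][c] == req[0]:
--                         grid[r][c] = 0
--
--     answer = 0
--
--     for r in range(n):
--         for c in range(m):
--             if grid[r][c]:
--                 answer += 1
--
--     return answer
-- ===== SOURCE B (Python) =====
-- def solution(storage, requests):
--     # Boxes kept in a dict {(r, c): label}; per request one border flood-fill
--     # (saturation) over the empty cells decides which boxes are reachable.
--     n, m = len(storage), len(storage[0])
--     boxes = {(r, c): storage[r][c] for r in range(n) for c in range(m)}
--
--     def reachable(outside, r, c):
--         return (r == 0 or r == n - 1 or c == 0 or c == m - 1 or
--                 (r - 1, c) in outside or (r + 1, c) in outside or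
--                 (r, c - 1) in outside or (r, c + 1) in outside)
--
--     for req in requests:
--         if len(req) == 1:
--             outside = set()
--             changed = True
--             while changed:
--                 changed = False
--                 for r in range(n):
--                     for c in range(m):
--                         if (r, c) not in outside and (r, c) not in boxes and \
--                            reachable(outside, r, c):
--                             outside.add((r, c))
--                             changed = True
--             boxes = {p: ch for p, ch in boxes.items()
--                      if not (ch == req and reachable(outside, *p))}
--         else:
--             boxes = {p: ch for p, ch in boxes.items() if ch != req[0]}
--     return len(boxes)
-- ===== Notes on version B (the rewrite author's own statement) =====
-- stated objective: alternative
-- what changed: A keeps a 2D grid and runs one queue-based BFS from every box matching the request to test outside-reachability; B keeps the surviving boxes in a dict keyed by coordinate, computes once per request the set of outside-connected empty cells by an iterated border flood-fill saturation over a set, and rebuilds the dict by filtering its items; the answer is the dict's size.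
import Mathlib
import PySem

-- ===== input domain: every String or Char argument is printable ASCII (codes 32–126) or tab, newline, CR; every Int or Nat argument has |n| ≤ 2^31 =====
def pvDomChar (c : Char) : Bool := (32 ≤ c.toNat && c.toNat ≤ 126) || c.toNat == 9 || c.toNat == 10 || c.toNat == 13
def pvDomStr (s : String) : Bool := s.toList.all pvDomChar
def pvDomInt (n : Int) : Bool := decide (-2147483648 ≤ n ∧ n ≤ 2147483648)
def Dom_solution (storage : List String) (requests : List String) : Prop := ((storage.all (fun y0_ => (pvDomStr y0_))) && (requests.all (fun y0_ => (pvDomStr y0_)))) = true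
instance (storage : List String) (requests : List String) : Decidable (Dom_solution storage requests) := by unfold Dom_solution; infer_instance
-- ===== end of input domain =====

-- B replaces A's per-box BFS over a 2D grid by a coordinate-keyed dict of boxes and one
-- border flood-fill (set saturation) per request; objective: alternative algorithm, not measured faster.


-- ===== PORT A =====
def pvInR (n m r c : Int) : Bool := decide (0 ≤ r ∧ r < n ∧ 0 ≤ c ∧ c < m)

def pvCell (g : List (List (Option Char))) (r c : Int) : Option Char :=
  (((g[r.toNat]?).getD [])[c.toNat]?).getD none

def pvGSet (g : List (List (Option Char))) (r c : Int) : List (List (Option Char)) :=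
  g.set r.toNat (((g[r.toNat]?).getD []).set c.toNat none)

def pvDirs : List (Int × Int) := [(-1, 0), (1, 0), (0, -1), (0, 1)]

def pvVGet (v : List (List Nat)) (r c : Int) : Nat := (((v[r.toNat]?).getD [])[c.toNat]?).getD 0
def pvVSet (v : List (List Nat)) (r c : Int) : List (List Nat) :=
  v.set r.toNat (((v[r.toNat]?).getD []).set c.toNat 1)

-- one step of A's BFS while-loop body: scan the four directions of the popped cell (r, c);
-- `none` models the Python `return True`
def pvScan (n m : Int) (g : List (List (Option Char))) (r c : Int) :
    List (Int × Int) → List (Int × Int) → List (List Nat) → Option (List (Int × Int) × List (List Nat))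
  | [], q, v => some (q, v)
  | (dr, dc) :: ds, q, v =>
      let nr := r + dr
      let nc := c + dc
      if pvInR n m nr nc then
        if pvCell g nr nc = none ∧ pvVGet v nr nc = 0 then
          pvScan n m g r c ds (q ++ [(nr, nc)]) (pvVSet v nr nc)
        else pvScan n m g r c ds q v
      else none

def pvBfsLoop (n m : Int) (g : List (List (Option Char))) :
    Nat → List (Int × Int) → List (List Nat) → Bool
  | 0, _, _ => false
  | _ + 1, [], _ => false
  | fuel + 1, (r, c) :: q, v =>
      match pvScan n m g r c pvDirs q v with
      | none => true
      | some (q', v') => pvBfsLoop n m g fuel q' v'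

-- fuel n*m is enough: every enqueued cell is freshly marked visited, so at most n*m pops happen
-- (proved as part of the invariant below)
def pvBfs (n m : Int) (g : List (List (Option Char))) (s : Int × Int) : Bool :=
  pvBfsLoop n m g (n.toNat * m.toNat) [s]
    (pvVSet (List.replicate n.toNat (List.replicate m.toNat 0)) s.1 s.2)

def pvStepA (n m : Nat) (g : List (List (Option Char))) (req : String) : List (List (Option Char)) :=
  match req.toList with
  | [ch] =>
      let l := (List.range n).flatMap fun (r : Nat) => (List.range m).filterMap fun (c : Nat) =>
        if pvCell g r c = some ch ∧ pvBfs n m g ((r : Int), (c : Int)) then some ((r : Int), (c : Int)) else none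
      l.foldl (fun g p => pvGSet g p.1 p.2) g
  | t :: _ =>
      (List.range n).foldl (fun g (r : Nat) => (List.range m).foldl (fun g (c : Nat) =>
        if pvCell g r c = some t then pvGSet g r c else g) g) g
  | [] => g

def solution (storage : List String) (requests : List String) : Int :=
  let n := storage.length
  let m := (storage.headD "").length
  let g0 : List (List (Option Char)) := storage.map fun s => s.toList.map some
  let gF := requests.foldl (pvStepA n m) g0
  (List.range n).foldl (fun a (r : Nat) => (List.range m).foldl (fun a (c : Nat) =>
    if (pvCell gF r c).isSome then a + 1 else a) a) 0

-- ===== PORT B =====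
-- `reachable(outside, r, c)` of Source B
def pvReach (n m : Int) (o : PySem.Set (Int × Int)) (r c : Int) : Bool :=
  decide (r = 0) || decide (r = n - 1) || decide (c = 0) || decide (c = m - 1) ||
    PySem.Set.contains o (r - 1, c) || PySem.Set.contains o (r + 1, c) ||
    PySem.Set.contains o (r, c - 1) || PySem.Set.contains o (r, c + 1)

-- one `for r: for c:` pass of Source B's `while changed` loop; the Bool is `changed`
def pvPass (n m : Nat) (d : PySem.Dict (Int × Int) Char) (acc : PySem.Set (Int × Int) × Bool) :
    PySem.Set (Int × Int) × Bool :=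
  (List.range n).foldl (fun acc (r : Nat) => (List.range m).foldl (fun acc (c : Nat) =>
    if !(PySem.Set.contains acc.1 ((r : Int), (c : Int))) && !(d.contains ((r : Int), (c : Int))) &&
        pvReach n m acc.1 r c
    then (PySem.Set.add acc.1 ((r : Int), (c : Int)), true) else acc) acc) acc

-- Source B's `while changed` loop; n*m+1 passes always reach the fixpoint (proved below)
def pvFlood (n m : Nat) (d : PySem.Dict (Int × Int) Char) :
    Nat → PySem.Set (Int × Int) → PySem.Set (Int × Int)
  | 0, o => o
  | fuel + 1, o =>
      match pvPass n m d (o, false) with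
      | (o', true) => pvFlood n m d fuel o'
      | (o', false) => o'

-- a dict comprehension over the items of a dict keeps distinct keys in order: it is
-- exactly the filtered items list (exact; PySem.Dict is the insertion-ordered assoc list)
def pvStepB (n m : Nat) (d : PySem.Dict (Int × Int) Char) (req : String) :
    PySem.Dict (Int × Int) Char :=
  match req.toList with
  | [t] =>
      let o := pvFlood n m d (n * m + 1) PySem.Set.empty
      PySem.Dict.mk (d.items.filter fun pc => !(pc.2 == t && pvReach n m o pc.1.1 pc.1.2))
  | _ =>
      -- `ch != req[0]`; req[0] is only evaluated when an item exists (head? = none only outside Pre_)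
      PySem.Dict.mk (d.items.filter fun pc => !(req.toList.head? == some pc.2))

def solution_alt (storage : List String) (requests : List String) : Int :=
  let n := storage.length
  let m := (storage.headD "").length
  -- the dict comprehension over the (distinct) cells, as dict(pairs)
  let d0 : PySem.Dict (Int × Int) Char := PySem.Dict.ofList
    ((List.range n).flatMap fun (r : Nat) => (List.range m).map fun (c : Nat) =>
      (((r : Int), (c : Int)), ((storage.getD r "").toList).getD c ' '))
  let d := requests.foldl (pvStepB n m) d0
  (PySem.Dict.size d : Int)

-- ===== PRECONDITION & SPEC =====
-- Pre_ is exactly where the Python A returns: storage nonempty, every row at least as long as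
-- row 0 (a shorter row raises IndexError), and, unless row 0 is empty (then no cell is ever
-- indexed), no empty request string (an empty request raises IndexError at req[0]).
def Pre_solution (storage : List String) (requests : List String) : Prop :=
  storage ≠ [] ∧ (∀ s ∈ storage, (storage.headD "").length ≤ s.length) ∧
    ((∀ r ∈ requests, r ≠ "") ∨ (storage.headD "").length = 0)
instance (storage : List String) (requests : List String) : Decidable (Pre_solution storage requests) := by
  unfold Pre_solution; infer_instance

def pvWitness_solution : List String × List String := (["AB", "  "], ["B", "A"])

def Spec_solution (storage : List String) (requests : List String) (out : Int) : Prop := out = solution_alt storage requests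
instance (storage : List String) (requests : List String) (out : Int) : Decidable (Spec_solution storage requests out) := by unfold Spec_solution; infer_instance

-- ===== CLAIM (what is proved, stated in full; the proofs are below) =====
def Claim_equal_solution : Prop := ∀ (storage : List String) (requests : List String), Dom_solution storage requests → Pre_solution storage requests → Spec_solution storage requests (solution storage requests)

-- ===== LEMMAS AND PROOFS =====

-- ---- the common reachability specification both programs are proved against ----
def pvNbrs (r c : Int) : List (Int × Int) := [(r - 1, c), (r + 1, c), (r, c - 1), (r, c + 1)]

def pvBorder (n m r c : Int) : Bool := decide (r = 0 ∨ r = n - 1 ∨ c = 0 ∨ c = m - 1)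

-- `pvEg n m g p`: p is an in-range empty (removed) cell of A's grid g
def pvEg (n m : Int) (g : List (List (Option Char))) (p : Int × Int) : Prop :=
  pvInR n m p.1 p.2 = true ∧ pvCell g p.1 p.2 = none

-- `pvEB n m d p`: p is an in-range cell holding no box of B's dict d
def pvEB (n m : Int) (d : PySem.Dict (Int × Int) Char) (p : Int × Int) : Prop :=
  pvInR n m p.1 p.2 = true ∧ d.contains p = false

def pvAdj (p q : Int × Int) : Prop := q ∈ pvNbrs p.1 p.2

def pvStepR (E : Int × Int → Prop) (p q : Int × Int) : Prop := E p ∧ E q ∧ pvAdj p q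

def pvReachR (E : Int × Int → Prop) : Int × Int → Int × Int → Prop := Relation.ReflTransGen (pvStepR E)

-- empty cell connected (through empty cells) to a border cell
def pvOutsideR (n m : Int) (E : Int × Int → Prop) (e : Int × Int) : Prop :=
  E e ∧ ∃ b, E b ∧ pvBorder n m b.1 b.2 = true ∧ pvReachR E e b

-- a cell from which A's bfs reports True: on the border, or next to an outside-connected empty cell
def pvAccR (n m : Int) (E : Int × Int → Prop) (s : Int × Int) : Prop :=
  pvBorder n m s.1 s.2 = true ∨ ∃ e, pvAdj s e ∧ pvOutsideR n m E e

def pvGridOk (n m : Nat) (g : List (List (Option Char))) : Prop :=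
  g.length = n ∧ ∀ row ∈ g, m ≤ row.length

def pvCells (n m : Nat) : List (Int × Int) :=
  (List.range n).flatMap fun (r : Nat) => (List.range m).map fun (c : Nat) => ((r : Int), (c : Int))

-- ---- small geometric lemmas ----
lemma pvNbrs_eq_map (r c : Int) : pvNbrs r c = pvDirs.map fun d => (r + d.1, c + d.2) := by
  simp [pvNbrs, pvDirs, Int.sub_eq_add_neg]

lemma pvAdj_symm {p q : Int × Int} (h : pvAdj p q) : pvAdj q p := by
  obtain ⟨a, b⟩ := p; obtain ⟨x, y⟩ := q
  simp [pvAdj, pvNbrs, Prod.ext_iff] at h ⊢; omega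

lemma pvBorder_of_nbr_out {n m : Nat} {p q : Int × Int} (hp : pvInR n m p.1 p.2 = true)
    (hq : pvAdj p q) (h : pvInR n m q.1 q.2 = false) : pvBorder n m p.1 p.2 = true := by
  obtain ⟨a, b⟩ := p; obtain ⟨x, y⟩ := q
  simp [pvAdj, pvNbrs, Prod.ext_iff] at hq
  simp [pvInR] at hp h; simp [pvBorder]; omega

lemma pvNbr_out_of_border {n m : Nat} {p : Int × Int} (hp : pvInR n m p.1 p.2 = true)
    (hb : pvBorder n m p.1 p.2 = true) : ∃ q, pvAdj p q ∧ pvInR n m q.1 q.2 = false := by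
  obtain ⟨a, b⟩ := p
  simp [pvInR] at hp; simp [pvBorder] at hb
  simp only [pvAdj, pvNbrs, List.mem_cons, Prod.ext_iff]
  rcases hb with h | h | h | h
  · exact ⟨(a - 1, b), by simp, by simp [pvInR]; omega⟩
  · exact ⟨(a + 1, b), by simp, by simp [pvInR]; omega⟩
  · exact ⟨(a, b - 1), by simp, by simp [pvInR]; omega⟩
  · exact ⟨(a, b + 1), by simp, by simp [pvInR]; omega⟩

lemma pvMem_cells {n m : Nat} {p : Int × Int} : p ∈ pvCells n m ↔ pvInR n m p.1 p.2 = true := by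
  obtain ⟨a, b⟩ := p
  simp [pvCells, pvInR, Prod.ext_iff]
  constructor
  · rintro ⟨r, hr, c, hc, h1, h2⟩; omega
  · rintro ⟨h1, h2, h3, h4⟩
    exact ⟨a.toNat, by omega, b.toNat, by omega, by omega, by omega⟩

lemma pvCells_length {n m : Nat} : (pvCells n m).length = n * m := by
  simp [pvCells, List.length_flatMap]

lemma pvCells_nodup {n m : Nat} : (pvCells n m).Nodup := by
  unfold pvCells
  rw [List.nodup_flatMap]
  constructor
  · intro r _
    exact (List.nodup_range).map (fun a b h => by
      have := congrArg Prod.snd h; simpa using this)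
  · have hlt : (List.range n).Pairwise (· < ·) := List.pairwise_lt_range
    refine hlt.imp ?_
    intro r1 r2 hlt12 x hx1 hx2
    obtain ⟨c1, -, e1⟩ := List.mem_map.mp hx1
    obtain ⟨c2, -, e2⟩ := List.mem_map.mp hx2
    have := congrArg Prod.fst (e1.trans e2.symm)
    simp at this
    omega

lemma pvStepR_symm {E : Int × Int → Prop} : Symmetric (pvStepR E) := by
  rintro p q ⟨h1, h2, h3⟩; exact ⟨h2, h1, pvAdj_symm h3⟩

-- under the grid↔dict invariant the two emptiness predicates coincide
lemma pvEg_eq_pvEB {n m : Nat} {gA : List (List (Option Char))} {d : PySem.Dict (Int × Int) Char}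
    (hEq : ∀ r c : Int, pvInR n m r c = true → pvCell gA r c = d.get? (r, c)) :
    pvEg n m gA = pvEB n m d := by
  funext p
  unfold pvEg pvEB
  by_cases h : pvInR (n : Int) (m : Int) p.1 p.2 = true
  · simp only [h, true_and, eq_iff_iff]
    rw [hEq p.1 p.2 h]
    have hp : ((p.1, p.2) : Int × Int) = p := rfl
    rw [hp, PySem.Dict.contains_eq_isSome_get?]
    cases d.get? p <;> simp
  · simp [h]

-- ---- visited-matrix lemmas (A side) ----
def pvVShape (n m : Nat) (v : List (List Nat)) : Prop := v.length = n ∧ ∀ row ∈ v, row.length = m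

def pvVisP (v : List (List Nat)) (p : Int × Int) : Prop := pvVGet v p.1 p.2 ≠ 0

def pvVFin (n m : Nat) (v : List (List Nat)) : Finset (ℕ × ℕ) :=
  (Finset.range n ×ˢ Finset.range m).filter fun rc => pvVGet v rc.1 rc.2 ≠ 0

lemma pvVShape_set {n m : Nat} {v : List (List Nat)} (hv : pvVShape n m v) (r c : Int) :
    pvVShape n m (pvVSet v r c) := by
  obtain ⟨h1, h2⟩ := hv
  refine ⟨by simp [pvVSet, h1], ?_⟩
  intro row hrow
  by_cases hr : r.toNat < v.length
  · rcases List.mem_or_eq_of_mem_set hrow with hm | hm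
    · exact h2 _ hm
    · subst hm
      have : v[r.toNat]? = some v[r.toNat] := List.getElem?_eq_getElem hr
      rw [this]; simp [h2 _ (List.getElem_mem hr)]
  · rw [pvVSet, List.set_eq_of_length_le (by omega)] at hrow
    exact h2 _ hrow

lemma pvVGet_set {n m : Nat} {v : List (List Nat)} (hv : pvVShape n m v) {r c r' c' : Int}
    (h : pvInR n m r c = true) (h' : pvInR n m r' c' = true) :
    pvVGet (pvVSet v r c) r' c' = if r' = r ∧ c' = c then 1 else pvVGet v r' c' := by
  simp only [pvInR, decide_eq_true_eq] at h h'
  obtain ⟨hv1, hv2⟩ := hv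
  have hr : r.toNat < v.length := by omega
  have hr' : r'.toNat < v.length := by omega
  have hrow : v[r.toNat]? = some v[r.toNat] := List.getElem?_eq_getElem hr
  have hrow' : v[r'.toNat]? = some v[r'.toNat] := List.getElem?_eq_getElem hr'
  have hrl : v[r.toNat].length = m := hv2 _ (List.getElem_mem hr)
  have hcl : c.toNat < v[r.toNat].length := by omega
  simp only [pvVGet, pvVSet, hrow, Option.getD_some, List.getElem?_set]
  by_cases hrr : r.toNat = r'.toNat
  · simp only [if_pos hrr, if_pos hr, Option.getD_some, List.getElem?_set]
    by_cases hcc : c.toNat = c'.toNat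
    · have he : r' = r ∧ c' = c := by omega
      simp [hcl, he]
    · have he : ¬(r' = r ∧ c' = c) := by omega
      have hrv : v[r'.toNat] = v[r.toNat] := by congr 1; omega
      simp [if_neg hcc, he, hrow', hrv]
  · have he : ¬(r' = r ∧ c' = c) := by omega
    simp [if_neg hrr, he]

lemma pvVGet_replicate {n m : Nat} (r c : Int) :
    pvVGet (List.replicate n (List.replicate m 0)) r c = 0 := by
  unfold pvVGet
  rcases h : (List.replicate n (List.replicate m (0:Nat)))[r.toNat]? with _ | row
  · simp
  · have := List.mem_of_getElem? h
    rw [List.eq_of_mem_replicate this]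
    simp only [Option.getD_some]
    rcases h2 : (List.replicate m (0:Nat))[c.toNat]? with _ | x
    · simp
    · have := List.mem_of_getElem? h2
      rw [List.eq_of_mem_replicate this]; simp

lemma pvVFin_set {n m : Nat} {v : List (List Nat)} (hv : pvVShape n m v) {r c : Int}
    (h : pvInR n m r c = true) (h0 : pvVGet v r c = 0) :
    pvVFin n m (pvVSet v r c) = insert (r.toNat, c.toNat) (pvVFin n m v) := by
  have hb := h
  simp only [pvInR, decide_eq_true_eq] at hb
  ext ⟨x, y⟩
  simp only [pvVFin, Finset.mem_filter, Finset.mem_insert, Finset.mem_product, Finset.mem_range,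
    Prod.ext_iff]
  by_cases hxy : x < n ∧ y < m
  · have hin : pvInR n m (x : Int) (y : Int) = true := by simp [pvInR]; omega
    rw [pvVGet_set hv h hin]
    constructor
    · rintro ⟨-, hget⟩
      by_cases he : (x:Int) = r ∧ (y:Int) = c
      · left; omega
      · right; exact ⟨hxy, by simpa [he] using hget⟩
    · rintro (⟨hx, hy⟩ | ⟨-, hget⟩)
      · have he : (x:Int) = r ∧ (y:Int) = c := by omega
        simp [hxy, he]
      · refine ⟨hxy, ?_⟩
        by_cases he : (x:Int) = r ∧ (y:Int) = c
        · exfalso; apply hget; rw [← he.1, ← he.2] at h0; exact h0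
        · simpa [he] using hget
  · constructor
    · rintro ⟨hx, -⟩; exact absurd hx hxy
    · rintro (⟨hx, hy⟩ | ⟨hx, -⟩)
      · exfalso; apply hxy; constructor <;> omega
      · exact absurd hx hxy

lemma pvVFin_card_set {n m : Nat} {v : List (List Nat)} (hv : pvVShape n m v) {r c : Int}
    (h : pvInR n m r c = true) (h0 : pvVGet v r c = 0) :
    (pvVFin n m (pvVSet v r c)).card = (pvVFin n m v).card + 1 := by
  rw [pvVFin_set hv h h0, Finset.card_insert_of_notMem]
  intro hmem
  simp only [pvVFin, Finset.mem_filter] at hmem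
  apply hmem.2
  have e1 : ((r.toNat : Int)) = r := by
    have hb := h; simp only [pvInR, decide_eq_true_eq] at hb; omega
  have e2 : ((c.toNat : Int)) = c := by
    have hb := h; simp only [pvInR, decide_eq_true_eq] at hb; omega
  simpa [e1, e2] using h0

lemma pvVFin_card_le {n m : Nat} (v : List (List Nat)) : (pvVFin n m v).card ≤ n * m := by
  calc (pvVFin n m v).card ≤ (Finset.range n ×ˢ Finset.range m).card := Finset.card_filter_le _ _
    _ = n * m := by simp

-- ---- A's BFS computes pvAccR ----
def pvRS (n m : Nat) (g : List (List (Option Char))) (s p : Int × Int) : Prop :=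
  p = s ∨ (pvEg n m g p ∧ ∃ e, pvAdj s e ∧ pvEg n m g e ∧ pvReachR (pvEg n m g) e p)

def pvProcessed (n m : Nat) (g : List (List (Option Char))) (v : List (List Nat)) (p : Int × Int) : Prop :=
  (∀ q, pvAdj p q → pvInR n m q.1 q.2 = true) ∧
  (∀ q, pvAdj p q → pvCell g q.1 q.2 = none → pvVisP v q)

def pvInv (n m : Nat) (g : List (List (Option Char))) (s : Int × Int)
    (fuel : Nat) (q : List (Int × Int)) (v : List (List Nat)) : Prop :=
  pvVShape n m v ∧ pvVisP v s ∧
  (∀ p ∈ q, pvInR n m p.1 p.2 = true ∧ pvVisP v p) ∧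
  (∀ p : Int × Int, pvInR n m p.1 p.2 = true → pvVisP v p → pvRS n m g s p) ∧
  (∀ p : Int × Int, pvInR n m p.1 p.2 = true → pvVisP v p → p ∉ q → pvProcessed n m g v p) ∧
  q.length + (n * m - (pvVFin n m v).card) ≤ fuel

lemma pvScan_spec (n m : Nat) (g : List (List (Option Char))) (r c : Int) :
    ∀ (ds : List (Int × Int)) (q : List (Int × Int)) (v : List (List Nat)), pvVShape n m v →
    (pvScan n m g r c ds q v = none → ∃ d ∈ ds, pvInR n m (r + d.1) (c + d.2) = false) ∧
    (∀ q₂ v₂, pvScan n m g r c ds q v = some (q₂, v₂) → ∃ new,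
      q₂ = q ++ new ∧
      pvVShape n m v₂ ∧
      (pvVFin n m v₂).card = (pvVFin n m v).card + new.length ∧
      (∀ d ∈ ds, pvInR n m (r + d.1) (c + d.2) = true) ∧
      (∀ p ∈ new, (∃ d ∈ ds, p = (r + d.1, c + d.2)) ∧ pvInR n m p.1 p.2 = true ∧ pvCell g p.1 p.2 = none) ∧
      (∀ p : Int × Int, pvInR n m p.1 p.2 = true → (pvVisP v₂ p ↔ pvVisP v p ∨ p ∈ new)) ∧
      (∀ d ∈ ds, pvCell g (r + d.1) (c + d.2) = none → pvInR n m (r + d.1) (c + d.2) = true →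
        pvVisP v₂ (r + d.1, c + d.2))) := by
  intro ds
  induction ds with
  | nil =>
      intro q v hv
      refine ⟨by intro h; simp [pvScan] at h, ?_⟩
      intro q₂ v₂ hsome
      simp only [pvScan, Option.some.injEq, Prod.mk.injEq] at hsome
      obtain ⟨hq, hv2⟩ := hsome
      subst hq; subst hv2
      exact ⟨[], by simp, hv, by simp, by simp, by simp, fun p _ => by simp, by simp⟩
  | cons d ds ih =>
      obtain ⟨dr, dc⟩ := d
      intro q v hv
      by_cases hr : pvInR n m (r + dr) (c + dc) = true
      · by_cases hcond : pvCell g (r + dr) (c + dc) = none ∧ pvVGet v (r + dr) (c + dc) = 0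
        · -- fresh empty neighbour: enqueue and mark
          have hscan : pvScan n m g r c ((dr, dc) :: ds) q v =
              pvScan n m g r c ds (q ++ [(r + dr, c + dc)]) (pvVSet v (r + dr) (c + dc)) := by
            simp [pvScan, hr, hcond]
          have hv' := pvVShape_set hv (r + dr) (c + dc)
          obtain ⟨ihn, ihs⟩ := ih (q ++ [(r + dr, c + dc)]) (pvVSet v (r + dr) (c + dc)) hv'
          constructor
          · intro hnone
            rw [hscan] at hnone
            obtain ⟨d, hd, hout⟩ := ihn hnone
            exact ⟨d, List.mem_cons_of_mem _ hd, hout⟩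
          · intro q₂ v₂ hsome
            rw [hscan] at hsome
            obtain ⟨new', e_q, e_shape, e_card, e_inr, e_new, e_iff, e_nbr⟩ := ihs q₂ v₂ hsome
            have hvset : ∀ p : Int × Int, pvInR n m p.1 p.2 = true →
                (pvVisP (pvVSet v (r + dr) (c + dc)) p ↔ p = (r + dr, c + dc) ∨ pvVisP v p) := by
              intro p hp
              rw [pvVisP, pvVGet_set hv hr hp]
              by_cases he : p.1 = r + dr ∧ p.2 = c + dc
              · simp [he, Prod.ext_iff]
              · simp [he, pvVisP, Prod.ext_iff]
            refine ⟨(r + dr, c + dc) :: new', ?_, e_shape, ?_, ?_, ?_, ?_, ?_⟩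
            · rw [e_q, List.append_assoc]; rfl
            · rw [e_card, pvVFin_card_set hv hr hcond.2, List.length_cons]; omega
            · intro d hd
              rcases List.mem_cons.mp hd with h | h
              · rw [h]; exact hr
              · exact e_inr d h
            · intro p hp
              rcases List.mem_cons.mp hp with h | h
              · subst h
                exact ⟨⟨(dr, dc), List.mem_cons_self, rfl⟩, hr, hcond.1⟩
              · obtain ⟨⟨d, hd, he⟩, h1, h2⟩ := e_new p h
                exact ⟨⟨d, List.mem_cons_of_mem _ hd, he⟩, h1, h2⟩
            · intro p hp
              rw [e_iff p hp, hvset p hp]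
              constructor
              · rintro ((h | h) | h)
                · exact Or.inr (by simp [h])
                · exact Or.inl h
                · exact Or.inr (List.mem_cons_of_mem _ h)
              · rintro (h | h)
                · exact Or.inl (Or.inr h)
                · rcases List.mem_cons.mp h with h | h
                  · exact Or.inl (Or.inl h)
                  · exact Or.inr h
            · intro d hd hcell hin
              rcases List.mem_cons.mp hd with h | h
              · obtain ⟨h1, h2⟩ : d.1 = dr ∧ d.2 = dc := by rw [h]; exact ⟨rfl, rfl⟩
                rw [h1, h2]
                rw [e_iff _ hr, hvset _ hr]
                exact Or.inl (Or.inl rfl)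
              · exact e_nbr d h hcell hin
        · -- neighbour out of the frontier: already visited or a box
          have hscan : pvScan n m g r c ((dr, dc) :: ds) q v = pvScan n m g r c ds q v := by
            simp [pvScan, hr, hcond]
          obtain ⟨ihn, ihs⟩ := ih q v hv
          constructor
          · intro hnone
            rw [hscan] at hnone
            obtain ⟨d, hd, hout⟩ := ihn hnone
            exact ⟨d, List.mem_cons_of_mem _ hd, hout⟩
          · intro q₂ v₂ hsome
            rw [hscan] at hsome
            obtain ⟨new', e_q, e_shape, e_card, e_inr, e_new, e_iff, e_nbr⟩ := ihs q₂ v₂ hsome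
            refine ⟨new', e_q, e_shape, e_card, ?_, ?_, e_iff, ?_⟩
            · intro d hd
              rcases List.mem_cons.mp hd with h | h
              · rw [h]; exact hr
              · exact e_inr d h
            · intro p hp
              obtain ⟨⟨d, hd, he⟩, h1, h2⟩ := e_new p hp
              exact ⟨⟨d, List.mem_cons_of_mem _ hd, he⟩, h1, h2⟩
            · intro d hd hcell hin
              rcases List.mem_cons.mp hd with h | h
              · obtain ⟨h1, h2⟩ : d.1 = dr ∧ d.2 = dc := by rw [h]; exact ⟨rfl, rfl⟩
                rw [h1, h2] at hcell ⊢
                have hvis : pvVisP v (r + dr, c + dc) := by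
                  intro h0
                  exact hcond ⟨hcell, h0⟩
                rw [e_iff _ hr]
                exact Or.inl hvis
              · exact e_nbr d h hcell hin
      · -- neighbour out of range: Python returns True
        have hscan : pvScan n m g r c ((dr, dc) :: ds) q v = none := by
          simp [pvScan, hr]
        refine ⟨fun _ => ⟨(dr, dc), List.mem_cons_self, by simpa using hr⟩, ?_⟩
        intro q₂ v₂ hsome
        rw [hscan] at hsome
        exact absurd hsome (by simp)

lemma pvNot_acc_of_drained {n m : Nat} {g : List (List (Option Char))} {s : Int × Int}
    (hs : pvInR n m s.1 s.2 = true) {fuel : Nat} {v : List (List Nat)}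
    (hInv : pvInv n m g s fuel [] v) : ¬ pvAccR n m (pvEg n m g) s := by
  obtain ⟨hshape, hvs, hq, hRS, hproc, hfuel⟩ := hInv
  have procAll : ∀ p : Int × Int, pvInR n m p.1 p.2 = true → pvVisP v p → pvProcessed n m g v p :=
    fun p hp hv' => hproc p hp hv' (by simp)
  have reach_vis : ∀ x y, pvReachR (pvEg n m g) x y → pvVisP v x → pvVisP v y := by
    intro x y h
    induction h with
    | refl => exact id
    | tail h1 step ih =>
        intro hx
        obtain ⟨E1, E2, hadj⟩ := step
        exact (procAll _ E1.1 (ih hx)).2 _ hadj E2.2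
  rintro (hb | ⟨e, hadj, ⟨Ee, b, Eb, hbord, hreach⟩⟩)
  · obtain ⟨w, hw1, hw2⟩ := pvNbr_out_of_border hs hb
    exact absurd ((procAll s hs hvs).1 w hw1) (by simp [hw2])
  · have hve : pvVisP v e := (procAll s hs hvs).2 e hadj Ee.2
    have hvb : pvVisP v b := reach_vis e b hreach hve
    obtain ⟨w, hw1, hw2⟩ := pvNbr_out_of_border Eb.1 hbord
    exact absurd ((procAll b Eb.1 hvb).1 w hw1) (by simp [hw2])

lemma pvBfsLoop_iff {n m : Nat} {g : List (List (Option Char))} {s : Int × Int}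
    (hs : pvInR n m s.1 s.2 = true) :
    ∀ (fuel : Nat) (q : List (Int × Int)) (v : List (List Nat)), pvInv n m g s fuel q v →
    (pvBfsLoop n m g fuel q v = true ↔ pvAccR n m (pvEg n m g) s) := by
  intro fuel
  induction fuel with
  | zero =>
      rintro (_ | ⟨p, q'⟩) v hInv
      · rw [show pvBfsLoop n m g 0 [] v = false from rfl]
        simp only [Bool.false_eq_true, false_iff]
        exact pvNot_acc_of_drained hs hInv
      · exfalso
        have := hInv.2.2.2.2.2
        simp [List.length_cons] at this
  | succ fuel ih =>
      rintro (_ | ⟨⟨a, b⟩, q'⟩) v hInv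
      · rw [show pvBfsLoop n m g (fuel + 1) [] v = false from rfl]
        simp only [Bool.false_eq_true, false_iff]
        exact pvNot_acc_of_drained hs hInv
      · obtain ⟨hshape, hvs, hq, hRS, hproc, hfuel⟩ := hInv
        obtain ⟨hscan_none, hscan_some⟩ := pvScan_spec n m g a b pvDirs q' v hshape
        simp only [pvBfsLoop]
        rcases hres : pvScan n m g a b pvDirs q' v with _ | ⟨q₂, v₂⟩
        · simp only [true_iff]
          obtain ⟨d, hd, hout⟩ := hscan_none hres
          have hpq := hq (a, b) List.mem_cons_self
          have hadj : pvAdj (a, b) (a + d.1, b + d.2) := by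
            rw [pvAdj, pvNbrs_eq_map]
            exact List.mem_map_of_mem hd
          have hbord := pvBorder_of_nbr_out hpq.1 hadj (by simpa using hout)
          rcases hRS _ hpq.1 hpq.2 with rfl | ⟨Ep, e, hadj_se, Ee, hreach⟩
          · exact Or.inl hbord
          · exact Or.inr ⟨e, hadj_se, Ee, (a, b), Ep, hbord, hreach⟩
        · obtain ⟨new, e_q, e_shape, e_card, e_inr, e_new, e_iff, e_nbr⟩ := hscan_some _ _ hres
          subst e_q
          apply ih
          have hpq := hq (a, b) List.mem_cons_self
          have hrs_ab := hRS _ hpq.1 hpq.2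
          have hadj_of : ∀ p : Int × Int, p ∈ new → pvAdj (a, b) p := by
            intro p hp
            obtain ⟨⟨d, hd, he⟩, _, _⟩ := e_new p hp
            rw [he, pvAdj, pvNbrs_eq_map]
            exact List.mem_map_of_mem hd
          refine ⟨e_shape, ?_, ?_, ?_, ?_, ?_⟩
          · exact (e_iff s hs).mpr (Or.inl hvs)
          · intro p hp
            rcases List.mem_append.mp hp with h | h
            · have := hq p (List.mem_cons_of_mem _ h)
              exact ⟨this.1, (e_iff p this.1).mpr (Or.inl this.2)⟩
            · obtain ⟨-, h1, -⟩ := e_new p h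
              exact ⟨h1, (e_iff p h1).mpr (Or.inr h)⟩
          · intro p hp hvp
            rcases (e_iff p hp).mp hvp with h | h
            · exact hRS p hp h
            · obtain ⟨-, h1, h2⟩ := e_new p h
              have hEp : pvEg n m g p := ⟨h1, h2⟩
              rcases hrs_ab with rfl | ⟨Ep, e, hadj_se, Ee, hreach⟩
              · exact Or.inr ⟨hEp, p, hadj_of p h, hEp, Relation.ReflTransGen.refl⟩
              · exact Or.inr ⟨hEp, e, hadj_se, Ee, hreach.tail ⟨Ep, hEp, hadj_of p h⟩⟩
          · intro p hp hvp hnq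
            have hvold : pvVisP v p := by
              rcases (e_iff p hp).mp hvp with h | h
              · exact h
              · exact absurd (List.mem_append.mpr (Or.inr h)) hnq
            by_cases hpa : p = (a, b)
            · subst hpa
              constructor
              · intro w hw
                rw [pvAdj, pvNbrs_eq_map] at hw
                obtain ⟨d, hd, he⟩ := List.mem_map.mp hw
                rw [← he]; exact e_inr d hd
              · intro w hw hcell
                rw [pvAdj, pvNbrs_eq_map] at hw
                obtain ⟨d, hd, he⟩ := List.mem_map.mp hw
                rw [← he] at hcell ⊢
                exact e_nbr d hd hcell (e_inr d hd)
            · have hnq' : p ∉ (a, b) :: q' := by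
                intro h
                rcases List.mem_cons.mp h with h | h
                · exact hpa h
                · exact hnq (List.mem_append.mpr (Or.inl h))
              obtain ⟨c1, c2⟩ := hproc p hp hvold hnq'
              refine ⟨c1, ?_⟩
              intro w hw hcell
              exact (e_iff w (c1 w hw)).mpr (Or.inl (c2 w hw hcell))
          · have hcard := pvVFin_card_le (n := n) (m := m) v₂
            rw [e_card] at hcard
            rw [List.length_append]
            rw [List.length_cons] at hfuel
            omega

lemma pvBfs_iff {n m : Nat} {g : List (List (Option Char))} {s : Int × Int}
    (hs : pvInR n m s.1 s.2 = true) :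
    (pvBfs n m g s = true ↔ pvAccR n m (pvEg n m g) s) := by
  have hb := hs
  simp only [pvInR, decide_eq_true_eq] at hb
  have hshape0 : pvVShape n m (List.replicate n (List.replicate m 0)) := by
    refine ⟨List.length_replicate, ?_⟩
    intro row h
    rw [List.eq_of_mem_replicate h]
    exact List.length_replicate
  have hv0 : pvVShape n m (pvVSet (List.replicate n (List.replicate m 0)) s.1 s.2) :=
    pvVShape_set hshape0 s.1 s.2
  have hvis0 : ∀ p : Int × Int, pvInR n m p.1 p.2 = true →
      (pvVisP (pvVSet (List.replicate n (List.replicate m 0)) s.1 s.2) p ↔ p = s) := by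
    intro p hp
    rw [pvVisP, pvVGet_set hshape0 hs hp]
    by_cases he : p.1 = s.1 ∧ p.2 = s.2
    · simp [he, Prod.ext_iff]
    · simp [he, Prod.ext_iff, pvVGet_replicate]
  have hcard0 : (pvVFin n m (pvVSet (List.replicate n (List.replicate m 0)) s.1 s.2)).card = 1 := by
    rw [pvVFin_card_set hshape0 hs (pvVGet_replicate s.1 s.2)]
    have : pvVFin n m (List.replicate n (List.replicate m 0)) = ∅ := by
      ext rc
      simp [pvVFin, pvVGet_replicate]
    rw [this]; simp
  rw [pvBfs]
  simp only [Int.toNat_natCast]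
  apply pvBfsLoop_iff hs
  refine ⟨hv0, (hvis0 s hs).mpr rfl, ?_, ?_, ?_, ?_⟩
  · intro p hp
    rcases List.mem_singleton.mp hp with rfl
    exact ⟨hs, (hvis0 p hs).mpr rfl⟩
  · intro p hp hvp
    rw [hvis0 p hp] at hvp
    exact Or.inl hvp
  · intro p hp hvp hnq
    rw [hvis0 p hp] at hvp
    exact absurd (by rw [hvp]; exact List.mem_singleton.mpr rfl) hnq
  · rw [hcard0]
    simp only [List.length_singleton]
    have hnm : 0 < n * m := Nat.mul_pos (by omega) (by omega)
    omega

-- ---- B's flood-fill computes pvOutsideR ----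
lemma pvReach_eq (n m : Int) (o : PySem.Set (Int × Int)) (r c : Int) :
    pvReach n m o r c = (pvBorder n m r c || (pvNbrs r c).any fun q => PySem.Set.contains o q) := by
  simp [pvReach, pvBorder, pvNbrs, Bool.decide_or, Bool.or_assoc]

def pvCondB (n m : Nat) (d : PySem.Dict (Int × Int) Char) (s : PySem.Set (Int × Int))
    (p : Int × Int) : Bool :=
  !(PySem.Set.contains s p) && !(d.contains p) && pvReach n m s p.1 p.2

def pvBStep (n m : Nat) (d : PySem.Dict (Int × Int) Char) (acc : PySem.Set (Int × Int) × Bool)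
    (p : Int × Int) : PySem.Set (Int × Int) × Bool :=
  if pvCondB n m d acc.1 p then (PySem.Set.add acc.1 p, true) else acc

lemma pvPass_eq (n m : Nat) (d : PySem.Dict (Int × Int) Char) (acc : PySem.Set (Int × Int) × Bool) :
    pvPass n m d acc = (pvCells n m).foldl (pvBStep n m d) acc := by
  unfold pvPass pvCells pvBStep pvCondB; rw [List.foldl_flatMap]; simp [List.foldl_map]

lemma pvBStep_flag {n m : Nat} {d : PySem.Dict (Int × Int) Char} :
    ∀ (l : List (Int × Int)) (acc : PySem.Set (Int × Int) × Bool),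
    acc.2 = true → (l.foldl (pvBStep n m d) acc).2 = true := by
  intro l
  induction l with
  | nil => intro acc h; exact h
  | cons p l ih =>
      intro acc h
      simp only [List.foldl_cons]
      apply ih
      unfold pvBStep
      split
      · rfl
      · exact h

lemma pvBStep_stall {n m : Nat} {d : PySem.Dict (Int × Int) Char} :
    ∀ (l : List (Int × Int)) (s : PySem.Set (Int × Int)),
    (l.foldl (pvBStep n m d) (s, false)).2 = false →
    l.foldl (pvBStep n m d) (s, false) = (s, false) ∧ ∀ p ∈ l, pvCondB n m d s p = false := by
  intro l
  induction l with
  | nil => intro s h; exact ⟨rfl, by simp⟩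
  | cons p l ih =>
      intro s h
      simp only [List.foldl_cons] at h ⊢
      by_cases hc : pvCondB n m d s p = true
      · exfalso
        have : (pvBStep n m d (s, false) p).2 = true := by simp [pvBStep, hc]
        have hf := pvBStep_flag (n := n) (m := m) (d := d) l _ this
        rw [hf] at h; exact absurd h (by simp)
      · have hstep : pvBStep n m d (s, false) p = (s, false) := by
          simp [pvBStep, hc]
        rw [hstep] at h ⊢
        obtain ⟨h1, h2⟩ := ih s h
        refine ⟨h1, ?_⟩
        intro q hq
        rcases List.mem_cons.mp hq with rfl | hq'
        · exact Bool.not_eq_true _ ▸ (by simpa using hc)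
        · exact h2 q hq'

lemma pvBStep_sound {n m : Nat} {d : PySem.Dict (Int × Int) Char} :
    ∀ (l : List (Int × Int)) (acc : PySem.Set (Int × Int) × Bool),
    (∀ p ∈ l, p ∈ pvCells n m) → (∀ x ∈ acc.1, pvOutsideR n m (pvEB n m d) x) →
    ∀ x ∈ (l.foldl (pvBStep n m d) acc).1, pvOutsideR n m (pvEB n m d) x := by
  intro l
  induction l with
  | nil => intro acc _ hacc x hx; exact hacc x hx
  | cons p l ih =>
      intro acc hl hacc
      simp only [List.foldl_cons]
      apply ih _ (fun q hq => hl q (List.mem_cons_of_mem _ hq))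
      intro x hx
      unfold pvBStep at hx
      split at hx
      · rename_i hc
        rcases (PySem.Set.mem_add _ _ _).mp hx with hx' | rfl
        · exact hacc x hx'
        · -- the added cell is outside-connected
          simp only [pvCondB, pvReach_eq, Bool.and_eq_true, Bool.or_eq_true,
            Bool.not_eq_true'] at hc
          obtain ⟨⟨hnc, hnb⟩, hor⟩ := hc
          have hE : pvEB n m d x := ⟨pvMem_cells.mp (hl x List.mem_cons_self), hnb⟩
          rcases hor with hbord | hany
          · exact ⟨hE, x, hE, hbord, Relation.ReflTransGen.refl⟩
          · obtain ⟨q, hqmem, hqc⟩ := List.any_eq_true.mp hany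
            have hq : q ∈ acc.1 := (PySem.Set.contains_iff _ _).mp hqc
            obtain ⟨Eq, b, Eb, hbord, hreach⟩ := hacc q hq
            exact ⟨hE, b, Eb, hbord, Relation.ReflTransGen.head ⟨hE, Eq, hqmem⟩ hreach⟩
      · exact hacc x hx

lemma pvBStep_nodup {n m : Nat} {d : PySem.Dict (Int × Int) Char} :
    ∀ (l : List (Int × Int)) (acc : PySem.Set (Int × Int) × Bool),
    acc.1.Nodup → (l.foldl (pvBStep n m d) acc).1.Nodup := by
  intro l
  induction l with
  | nil => intro acc h; exact h
  | cons p l ih =>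
      intro acc h
      simp only [List.foldl_cons]
      apply ih
      unfold pvBStep
      split
      · exact PySem.Set.nodup_add _ _ h
      · exact h

lemma pvBStep_subset {n m : Nat} {d : PySem.Dict (Int × Int) Char} :
    ∀ (l : List (Int × Int)) (acc : PySem.Set (Int × Int) × Bool),
    (∀ p ∈ l, p ∈ pvCells n m) → (∀ x ∈ acc.1, x ∈ pvCells n m) →
    ∀ x ∈ (l.foldl (pvBStep n m d) acc).1, x ∈ pvCells n m := by
  intro l
  induction l with
  | nil => intro acc _ hacc x hx; exact hacc x hx
  | cons p l ih =>
      intro acc hl hacc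
      simp only [List.foldl_cons]
      apply ih _ (fun q hq => hl q (List.mem_cons_of_mem _ hq))
      intro x hx
      unfold pvBStep at hx
      split at hx
      · rcases (PySem.Set.mem_add _ _ _).mp hx with hx' | rfl
        · exact hacc x hx'
        · exact hl x List.mem_cons_self
      · exact hacc x hx

lemma pvBStep_grow {n m : Nat} {d : PySem.Dict (Int × Int) Char} :
    ∀ (l : List (Int × Int)) (acc : PySem.Set (Int × Int) × Bool),
    acc.1.length ≤ (l.foldl (pvBStep n m d) acc).1.length ∧
    ((l.foldl (pvBStep n m d) acc).2 = true → acc.2 = false →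
      acc.1.length < (l.foldl (pvBStep n m d) acc).1.length) := by
  intro l
  induction l with
  | nil => intro acc; exact ⟨le_refl _, fun h1 h2 => absurd h1 (by simp [h2])⟩
  | cons p l ih =>
      intro acc
      simp only [List.foldl_cons]
      by_cases hc : pvCondB n m d acc.1 p = true
      · have hnc : PySem.Set.contains acc.1 p = false := by
          simp only [pvCondB, Bool.and_eq_true, Bool.not_eq_true'] at hc
          exact hc.1.1
        have hpm : p ∉ acc.1 := fun hm => by
          rw [(PySem.Set.contains_iff _ _).mpr hm] at hnc; exact absurd hnc (by simp)
        have hlen : (PySem.Set.add acc.1 p).length = acc.1.length + 1 := by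
          simp [PySem.Set.add, PySem.Set.contains, hpm]
        have hstep : pvBStep n m d acc p = (PySem.Set.add acc.1 p, true) := by
          simp [pvBStep, hc]
        rw [hstep]
        obtain ⟨ih1, -⟩ := ih (PySem.Set.add acc.1 p, true)
        constructor
        · calc acc.1.length ≤ acc.1.length + 1 := Nat.le_succ _
            _ = (PySem.Set.add acc.1 p, true).1.length := hlen.symm
            _ ≤ _ := ih1
        · intro _ _
          calc acc.1.length < acc.1.length + 1 := Nat.lt_succ_self _
            _ = (PySem.Set.add acc.1 p, true).1.length := hlen.symm
            _ ≤ _ := ih1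
      · have hstep : pvBStep n m d acc p = acc := by simp [pvBStep, hc]
        rw [hstep]
        exact ih acc

lemma pvFlood_spec (n m : Nat) (d : PySem.Dict (Int × Int) Char) :
    ∀ (fuel : Nat) (s : PySem.Set (Int × Int)), s.Nodup →
    (∀ x ∈ s, pvOutsideR n m (pvEB n m d) x) → (∀ x ∈ s, x ∈ pvCells n m) →
    n * m + 1 ≤ fuel + s.length →
    ∀ x, x ∈ pvFlood n m d fuel s ↔ pvOutsideR n m (pvEB n m d) x := by
  intro fuel
  induction fuel with
  | zero =>
      intro s hnd hsound hsub hle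
      exfalso
      have hlen : s.length ≤ (pvCells n m).length := (hnd.subperm hsub).length_le
      rw [pvCells_length] at hlen
      omega
  | succ fuel ih =>
      intro s hnd hsound hsub hle
      rcases hR : pvPass n m d (s, false) with ⟨s', flag⟩
      have hR' : (pvCells n m).foldl (pvBStep n m d) (s, false) = (s', flag) := by
        rw [← pvPass_eq]; exact hR
      cases flag with
      | false =>
          -- fixpoint reached: the marked set is exactly the outside-connected empty cells
          obtain ⟨hfix, hconds⟩ := pvBStep_stall (pvCells n m) s (by rw [hR'])
          have hs' : s' = s := by
            rw [hR'] at hfix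
            exact (Prod.mk.injEq _ _ _ _ ▸ hfix).1
          have hclosed : ∀ p : Int × Int, pvEB n m d p →
              (pvBorder n m p.1 p.2 = true ∨ ∃ q ∈ pvNbrs p.1 p.2, q ∈ s) → p ∈ s := by
            intro p hE hor
            by_contra hps
            have hcontains : PySem.Set.contains s p = false := by
              rw [Bool.eq_false_iff]
              intro hcontr
              exact hps ((PySem.Set.contains_iff _ _).mp hcontr)
            have hcond : pvCondB n m d s p = true := by
              simp only [pvCondB, pvReach_eq, Bool.and_eq_true, Bool.or_eq_true,
                Bool.not_eq_true']
              refine ⟨⟨hcontains, hE.2⟩, ?_⟩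
              rcases hor with h | ⟨q, hq1, hq2⟩
              · exact Or.inl h
              · exact Or.inr (List.any_eq_true.mpr ⟨q, hq1, (PySem.Set.contains_iff _ _).mpr hq2⟩)
            rw [hconds p (pvMem_cells.mpr hE.1)] at hcond
            exact absurd hcond (by simp)
          intro x
          simp only [pvFlood, hR, hs']
          constructor
          · exact hsound x
          · rintro ⟨Ee, b, Eb, hbord, hreach⟩
            have hrev : pvReachR (pvEB n m d) b x :=
              Relation.ReflTransGen.symmetric pvStepR_symm hreach
            have hb_s : b ∈ s := hclosed b Eb (Or.inl hbord)
            have walk : ∀ y, pvReachR (pvEB n m d) b y → y ∈ s := by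
              intro y hy
              induction hy with
              | refl => exact hb_s
              | tail h1 step ih2 =>
                  obtain ⟨E1, E2, hadj⟩ := step
                  exact hclosed _ E2 (Or.inr ⟨_, pvAdj_symm hadj, ih2⟩)
            exact walk x hrev
      | true =>
          have hsnd : s'.Nodup := by
            have := pvBStep_nodup (n := n) (m := m) (d := d) (pvCells n m) (s, false) hnd
            rw [hR'] at this; exact this
          have hssound : ∀ x ∈ s', pvOutsideR n m (pvEB n m d) x := by
            have := pvBStep_sound (pvCells n m) (s, false) (fun p hp => hp) hsound
            rw [hR'] at this; exact this
          have hssub : ∀ x ∈ s', x ∈ pvCells n m := by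
            have := pvBStep_subset (n := n) (m := m) (d := d) (pvCells n m) (s, false)
              (fun p hp => hp) hsub
            rw [hR'] at this; exact this
          have hgrow : s.length < s'.length := by
            obtain ⟨-, h2⟩ := pvBStep_grow (n := n) (m := m) (d := d) (pvCells n m) (s, false)
            have := h2 (by rw [hR']) rfl
            rw [hR'] at this; exact this
          intro x
          simp only [pvFlood, hR]
          exact ih s' hsnd hssound hssub (by omega) x

lemma pvReach_flood_iff {n m : Nat} {d : PySem.Dict (Int × Int) Char} (p : Int × Int) :
    pvReach n m (pvFlood n m d (n * m + 1) PySem.Set.empty) p.1 p.2 = true ↔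
      pvAccR n m (pvEB n m d) p := by
  have hchar := pvFlood_spec n m d (n * m + 1) PySem.Set.empty List.nodup_nil
    (by intro x hx; simp [PySem.Set.empty] at hx)
    (by intro x hx; simp [PySem.Set.empty] at hx)
    (by simp [PySem.Set.empty])
  rw [pvReach_eq]
  simp only [Bool.or_eq_true, List.any_eq_true, PySem.Set.contains_iff, pvAccR, pvAdj]
  constructor
  · rintro (h | ⟨q, hq1, hq2⟩)
    · exact Or.inl h
    · exact Or.inr ⟨q, hq1, (hchar q).mp hq2⟩
  · rintro (h | ⟨q, hq1, hq2⟩)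
    · exact Or.inl h
    · exact Or.inr ⟨q, hq1, (hchar q).mpr hq2⟩

-- ---- grid-update lemmas (A side) ----
lemma pvGridOk_gset {n m : Nat} {g : List (List (Option Char))} (hg : pvGridOk n m g) (r c : Int) :
    pvGridOk n m (pvGSet g r c) := by
  obtain ⟨h1, h2⟩ := hg
  refine ⟨by simp [pvGSet, h1], ?_⟩
  intro row hrow
  by_cases hr : r.toNat < g.length
  · rcases List.mem_or_eq_of_mem_set hrow with hm | hm
    · exact h2 _ hm
    · subst hm
      have : g[r.toNat]? = some g[r.toNat] := List.getElem?_eq_getElem hr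
      rw [this]
      simpa using h2 _ (List.getElem_mem hr)
  · rw [pvGSet, List.set_eq_of_length_le (by omega)] at hrow
    exact h2 _ hrow

lemma pvCell_gset {n m : Nat} {g : List (List (Option Char))} (hg : pvGridOk n m g) {r c r' c' : Int}
    (h : pvInR n m r c = true) (h' : pvInR n m r' c' = true) :
    pvCell (pvGSet g r c) r' c' = if r' = r ∧ c' = c then none else pvCell g r' c' := by
  simp only [pvInR, decide_eq_true_eq] at h h'
  obtain ⟨hv1, hv2⟩ := hg
  have hr : r.toNat < g.length := by omega
  have hr' : r'.toNat < g.length := by omega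
  have hrow : g[r.toNat]? = some g[r.toNat] := List.getElem?_eq_getElem hr
  have hrow' : g[r'.toNat]? = some g[r'.toNat] := List.getElem?_eq_getElem hr'
  have hrl : m ≤ g[r.toNat].length := hv2 _ (List.getElem_mem hr)
  have hcl : c.toNat < g[r.toNat].length := by omega
  simp only [pvCell, pvGSet, hrow, Option.getD_some, List.getElem?_set]
  by_cases hrr : r.toNat = r'.toNat
  · simp only [if_pos hrr, if_pos hr, Option.getD_some, List.getElem?_set]
    by_cases hcc : c.toNat = c'.toNat
    · have he : r' = r ∧ c' = c := by omega
      simp [hcl, he]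
    · have he : ¬(r' = r ∧ c' = c) := by omega
      have hrv : g[r'.toNat] = g[r.toNat] := by congr 1; omega
      simp [if_neg hcc, he, hrow', hrv]
  · have he : ¬(r' = r ∧ c' = c) := by omega
    simp [if_neg hrr, he]

lemma pvCell_foldl_gset {n m : Nat} :
    ∀ (l : List (Int × Int)) {g : List (List (Option Char))}, pvGridOk n m g →
    (∀ p ∈ l, pvInR n m p.1 p.2 = true) →
    pvGridOk n m (l.foldl (fun g p => pvGSet g p.1 p.2) g) ∧
    ∀ r c : Int, pvInR n m r c = true →
      pvCell (l.foldl (fun g p => pvGSet g p.1 p.2) g) r c =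
        if (r, c) ∈ l then none else pvCell g r c := by
  intro l
  induction l with
  | nil => intro g hg _; exact ⟨hg, fun r c _ => by simp⟩
  | cons p l ih =>
      intro g hg hl
      have hp := hl p List.mem_cons_self
      have hg' := pvGridOk_gset hg p.1 p.2
      obtain ⟨ih1, ih2⟩ := ih hg' (fun q hq => hl q (List.mem_cons_of_mem _ hq))
      refine ⟨by simpa using ih1, ?_⟩
      intro r c hin
      simp only [List.foldl_cons]
      rw [ih2 r c hin, pvCell_gset hg hp hin]
      by_cases hrc : (r, c) = p
      · have he : r = p.1 ∧ c = p.2 := by rw [← hrc]; exact ⟨rfl, rfl⟩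
        simp [he]
      · have he : ¬(r = p.1 ∧ c = p.2) := by
          intro hcontra
          exact hrc (Prod.ext hcontra.1 hcontra.2)
        by_cases hml : (r, c) ∈ l <;> simp [he, hml, hrc]

lemma pvCell_foldl_cond {n m : Nat} {t : Char} :
    ∀ (l : List (Int × Int)) {g : List (List (Option Char))}, pvGridOk n m g →
    (∀ p ∈ l, pvInR n m p.1 p.2 = true) →
    pvGridOk n m (l.foldl (fun g p => if pvCell g p.1 p.2 = some t then pvGSet g p.1 p.2 else g) g) ∧
    ∀ r c : Int, pvInR n m r c = true →
      pvCell (l.foldl (fun g p => if pvCell g p.1 p.2 = some t then pvGSet g p.1 p.2 else g) g) r c =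
        if (r, c) ∈ l ∧ pvCell g r c = some t then none else pvCell g r c := by
  intro l
  induction l with
  | nil => intro g hg _; exact ⟨hg, fun r c _ => by simp⟩
  | cons p l ih =>
      intro g hg hl
      have hp := hl p List.mem_cons_self
      simp only [List.foldl_cons]
      by_cases hcond : pvCell g p.1 p.2 = some t
      · have hg' := pvGridOk_gset hg p.1 p.2
        obtain ⟨ih1, ih2⟩ := ih hg' (fun q hq => hl q (List.mem_cons_of_mem _ hq))
        rw [if_pos hcond]
        refine ⟨ih1, ?_⟩
        intro r c hin
        rw [ih2 r c hin, pvCell_gset hg hp hin]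
        by_cases hrc : (r, c) = p
        · have he : r = p.1 ∧ c = p.2 := by rw [← hrc]; exact ⟨rfl, rfl⟩
          by_cases hml : (r, c) ∈ l ∧ (if r = p.1 ∧ c = p.2 then none else pvCell g r c) = some t
          · simp [he] at hml
          · simp [he, hcond]
        · have he : ¬(r = p.1 ∧ c = p.2) := by
            intro hcontra
            exact hrc (Prod.ext hcontra.1 hcontra.2)
          by_cases hml : (r, c) ∈ l <;> simp [he, hml, hrc]
      · rw [if_neg hcond]
        obtain ⟨ih1, ih2⟩ := ih hg (fun q hq => hl q (List.mem_cons_of_mem _ hq))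
        refine ⟨ih1, ?_⟩
        intro r c hin
        rw [ih2 r c hin]
        by_cases hrc : (r, c) = p
        · have hcell : pvCell g r c = pvCell g p.1 p.2 := by rw [← hrc]
          by_cases hml : (r, c) ∈ l <;>
            simp [hrc, hcell, hcond]
        · by_cases hml : (r, c) ∈ l <;> simp [hml, hrc]

lemma pvFoldl_cells {α : Type} (n m : Nat) (F : α → Int → Int → α) (a : α) :
    (List.range n).foldl (fun a (r : Nat) => (List.range m).foldl (fun a (c : Nat) => F a r c) a) a
      = (pvCells n m).foldl (fun a p => F a p.1 p.2) a := by
  unfold pvCells; rw [List.foldl_flatMap]; simp [List.foldl_map]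

-- ---- dict lemmas (B side) ----
-- lookup in a filtered association list with distinct keys
lemma pvGet?_mk_filter (l : List ((Int × Int) × Char)) (hnd : (l.map Prod.fst).Nodup)
    (P : (Int × Int) × Char → Bool) (k : Int × Int) :
    (PySem.Dict.mk (l.filter P)).get? k =
      match (PySem.Dict.mk l).get? k with
      | some v => if P (k, v) then some v else none
      | none => none := by
  induction l with
  | nil => simp [PySem.Dict.get?]
  | cons a l ih =>
      obtain ⟨ak, av⟩ := a
      simp only [List.map_cons, List.nodup_cons] at hnd
      obtain ⟨hak, hndl⟩ := hnd
      have hcons : (PySem.Dict.mk ((ak, av) :: l)).get? k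
          = if (ak == k) then some av else (PySem.Dict.mk l).get? k := PySem.Dict.get?_mk_cons _ _ _ _
      by_cases hk : ak = k
      · subst hk
        have hnoneF : ∀ Q, (PySem.Dict.mk (l.filter Q)).get? ak = none := by
          intro Q
          rw [PySem.Dict.get?_eq_none_iff_not_mem_keys]
          intro hmem
          apply hak
          obtain ⟨pr, hpr, he⟩ := List.mem_map.mp hmem
          exact List.mem_map.mpr ⟨pr, List.mem_of_mem_filter hpr, he⟩
        rw [hcons]
        simp only [BEq.rfl, if_true]
        by_cases hP : P (ak, av) = true
        · have hf : ((ak, av) :: l).filter P = (ak, av) :: l.filter P := by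
            simp [hP]
          rw [hf, PySem.Dict.get?_mk_cons]
          simp [hP]
        · have hf : ((ak, av) :: l).filter P = l.filter P := by
            simp [hP]
          rw [hf, hnoneF P]
          simp [hP]
      · have hbeq : (ak == k) = false := by simp [hk]
        rw [hcons, hbeq]
        simp only [Bool.false_eq_true, if_false]
        by_cases hP : P (ak, av) = true
        · have hf : ((ak, av) :: l).filter P = (ak, av) :: l.filter P := by
            simp [hP]
          rw [hf, PySem.Dict.get?_mk_cons, hbeq]
          simp only [Bool.false_eq_true, if_false]
          exact ih hndl
        · have hf : ((ak, av) :: l).filter P = l.filter P := by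
            simp [hP]
          rw [hf]
          exact ih hndl

lemma pvFilter_keys {d : PySem.Dict (Int × Int) Char} (hnd : d.keys.Nodup)
    (P : (Int × Int) × Char → Bool) :
    (PySem.Dict.mk (d.items.filter P)).keys.Nodup ∧
    ∀ p ∈ (PySem.Dict.mk (d.items.filter P)).keys, p ∈ d.keys := by
  have hsub : ((d.items.filter P).map Prod.fst).Sublist (d.items.map Prod.fst) :=
    (List.filter_sublist).map Prod.fst
  exact ⟨hnd.sublist hsub, fun p hp => hsub.subset hp⟩

-- ---- per-request equality ----
lemma pvStep_eq {n m : Nat} {gA : List (List (Option Char))} {d : PySem.Dict (Int × Int) Char}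
    (req : String) (hreq : req ≠ "" ∨ m = 0) (hA : pvGridOk n m gA)
    (hnd : d.keys.Nodup) (hsub : ∀ p ∈ d.keys, p ∈ pvCells n m)
    (hEq : ∀ r c : Int, pvInR n m r c = true → pvCell gA r c = d.get? (r, c)) :
    pvGridOk n m (pvStepA n m gA req) ∧ (pvStepB n m d req).keys.Nodup ∧
    (∀ p ∈ (pvStepB n m d req).keys, p ∈ pvCells n m) ∧
    ∀ r c : Int, pvInR n m r c = true →
      pvCell (pvStepA n m gA req) r c = (pvStepB n m d req).get? (r, c) := by
  have hbridge : pvEg n m gA = pvEB n m d := pvEg_eq_pvEB hEq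
  rcases hL : req.toList with _ | ⟨t, tl⟩
  · -- empty request: only reachable when m = 0 (no cell is in range)
    have hm : m = 0 := by
      rcases hreq with h | h
      · exact absurd (String.toList_eq_nil_iff.mp hL) h
      · exact h
    subst hm
    simp only [pvStepA, pvStepB, hL]
    obtain ⟨hknd, hksub⟩ := pvFilter_keys hnd (fun pc => !(([] : List Char).head? == some pc.2))
    refine ⟨hA, hknd, fun p hp => hsub p (hksub p hp), ?_⟩
    intro r c hin
    exfalso
    simp only [pvInR, decide_eq_true_eq] at hin
    omega
  · rcases tl with _ | ⟨t2, rest⟩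
    · -- single-character request
      simp only [pvStepA, pvStepB, hL]
      obtain ⟨hknd, hksub⟩ := pvFilter_keys hnd
        (fun pc => !(pc.2 == t && pvReach n m (pvFlood n m d (n * m + 1) PySem.Set.empty) pc.1.1 pc.1.2))
      refine ⟨?_, hknd, fun p hp => hsub p (hksub p hp), ?_⟩
      case _ =>
        have hlin : ∀ p ∈ (List.range n).flatMap fun (r : Nat) => (List.range m).filterMap fun (c : Nat) =>
            if pvCell gA r c = some t ∧ pvBfs n m gA ((r : Int), (c : Int)) = true then some ((r : Int), (c : Int))
            else none, pvInR n m p.1 p.2 = true := by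
          intro p hp
          obtain ⟨r', hr', c', hc', hcond⟩ := by
            simpa only [List.mem_flatMap, List.mem_filterMap, List.mem_range] using hp
          split at hcond
          · obtain rfl := (Option.some.injEq _ _).mp hcond |>.symm
            simp only [pvInR, decide_eq_true_eq]
            constructor
            · omega
            · refine ⟨by exact_mod_cast hr', by omega, by exact_mod_cast hc'⟩
          · exact absurd hcond (by simp)
        exact (pvCell_foldl_gset _ hA hlin).1
      -- the cell-by-cell equality
      have hlin : ∀ p ∈ (List.range n).flatMap fun (r : Nat) => (List.range m).filterMap fun (c : Nat) =>
          if pvCell gA r c = some t ∧ pvBfs n m gA ((r : Int), (c : Int)) = true then some ((r : Int), (c : Int))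
          else none, pvInR n m p.1 p.2 = true := by
        intro p hp
        obtain ⟨r', hr', c', hc', hcond⟩ := by
          simpa only [List.mem_flatMap, List.mem_filterMap, List.mem_range] using hp
        split at hcond
        · obtain rfl := (Option.some.injEq _ _).mp hcond |>.symm
          simp only [pvInR, decide_eq_true_eq]
          constructor
          · omega
          · refine ⟨by exact_mod_cast hr', by omega, by exact_mod_cast hc'⟩
        · exact absurd hcond (by simp)
      obtain ⟨hokA, hcellA⟩ := pvCell_foldl_gset _ hA hlin
      intro r c hin
      rw [hcellA r c hin]
      have hb := hin
      simp only [pvInR, decide_eq_true_eq] at hb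
      have e1 : ((r.toNat : Int)) = r := by omega
      have e2 : ((c.toNat : Int)) = c := by omega
      have hmem : ((r, c) ∈ (List.range n).flatMap fun (r : Nat) => (List.range m).filterMap fun (c : Nat) =>
          if pvCell gA ((r : Int)) ((c : Int)) = some t ∧ pvBfs n m gA ((r : Int), (c : Int)) = true then some ((r : Int), (c : Int))
          else none) ↔ (pvCell gA r c = some t ∧ pvBfs n m gA (r, c) = true) := by
        simp only [List.mem_flatMap, List.mem_filterMap, List.mem_range]
        constructor
        · rintro ⟨r', hr', c', hc', hcond⟩
          split at hcond
          · rename_i hc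
            obtain he := (Option.some.injEq _ _).mp hcond
            have er : ((r' : Int)) = r := congrArg Prod.fst he
            have ec : ((c' : Int)) = c := congrArg Prod.snd he
            rw [er, ec] at hc
            exact hc
          · exact absurd hcond (by simp)
        · intro hc
          refine ⟨r.toNat, by omega, c.toNat, by omega, ?_⟩
          rw [if_pos (by rw [e1, e2]; exact hc)]
          rw [e1, e2]
      have hbfs : pvBfs n m gA (r, c) = true ↔
          pvReach n m (pvFlood n m d (n * m + 1) PySem.Set.empty) r c = true := by
        rw [pvBfs_iff (s := (r, c)) hin, hbridge]
        exact (pvReach_flood_iff (p := (r, c))).symm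
      rw [pvGet?_mk_filter d.items hnd _ (r, c)]
      have hcc := hEq r c hin
      have hd : (PySem.Dict.mk d.items).get? (r, c) = d.get? (r, c) := rfl
      rw [hd, ← hcc]
      simp only [hmem, hbfs]
      rcases hcell : pvCell gA r c with _ | v
      · simp
      · by_cases hv : v = t
        · subst hv
          simp
          rcases Bool.eq_false_or_eq_true
               (pvReach (n : Int) (m : Int) (pvFlood n m d (n * m + 1) ([] : PySem.Set (Int × Int))) r c) with h | h <;>
            rw [h] <;> simp
        · simp [hv]
    · -- longer request: remove every box labelled t
      simp only [pvStepA, pvStepB, hL, List.head?_cons]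
      obtain ⟨hknd, hksub⟩ := pvFilter_keys hnd (fun pc => !((some t : Option Char) == some pc.2))
      rw [pvFoldl_cells n m (fun g r c => if pvCell g r c = some t then pvGSet g r c else g)]
      obtain ⟨hokA, hcellA⟩ := pvCell_foldl_cond (pvCells n m) hA (fun p hp => pvMem_cells.mp hp)
      refine ⟨hokA, hknd, fun p hp => hsub p (hksub p hp), ?_⟩
      intro r c hin
      rw [hcellA r c hin]
      rw [pvGet?_mk_filter d.items hnd _ (r, c)]
      have hd : (PySem.Dict.mk d.items).get? (r, c) = d.get? (r, c) := rfl
      rw [hd, ← hEq r c hin]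
      have hmem : (r, c) ∈ pvCells n m := pvMem_cells.mpr hin
      rcases hcell : pvCell gA r c with _ | v
      · simp
      · by_cases hv : v = t
        · subst hv; simp [hmem]
        · simp [hmem, hv, Ne.symm hv]

lemma pvFold_steps {n m : Nat} :
    ∀ (reqs : List String) {gA : List (List (Option Char))} {d : PySem.Dict (Int × Int) Char},
    (∀ req ∈ reqs, req ≠ "" ∨ m = 0) → pvGridOk n m gA → d.keys.Nodup →
    (∀ p ∈ d.keys, p ∈ pvCells n m) →
    (∀ r c : Int, pvInR n m r c = true → pvCell gA r c = d.get? (r, c)) →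
    (reqs.foldl (pvStepB n m) d).keys.Nodup ∧
    (∀ p ∈ (reqs.foldl (pvStepB n m) d).keys, p ∈ pvCells n m) ∧
    ∀ r c : Int, pvInR n m r c = true →
      pvCell (reqs.foldl (pvStepA n m) gA) r c = (reqs.foldl (pvStepB n m) d).get? (r, c) := by
  intro reqs
  induction reqs with
  | nil => intro gA d _ _ hnd hsub hEq; exact ⟨hnd, hsub, hEq⟩
  | cons req reqs ih =>
      intro gA d hreqs hA hnd hsub hEq
      obtain ⟨okA, hnd', hsub', hEq'⟩ :=
        pvStep_eq req (hreqs req List.mem_cons_self) hA hnd hsub hEq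
      simp only [List.foldl_cons]
      exact ih (fun q hq => hreqs q (List.mem_cons_of_mem _ hq)) okA hnd' hsub' hEq'

-- ---- the final count equals the dict size ----
lemma pvCount_eq {n m : Nat} {gA : List (List (Option Char))} {d : PySem.Dict (Int × Int) Char}
    (hnd : d.keys.Nodup) (hsub : ∀ p ∈ d.keys, p ∈ pvCells n m)
    (hEq : ∀ r c : Int, pvInR n m r c = true → pvCell gA r c = d.get? (r, c)) :
    (List.range n).foldl (fun a (r : Nat) => (List.range m).foldl (fun a (c : Nat) =>
        if (pvCell gA r c).isSome then a + 1 else a) a) (0 : Int)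
      = (PySem.Dict.size d : Int) := by
  rw [pvFoldl_cells n m (fun (a : Int) r c => if (pvCell gA r c).isSome then a + 1 else a)]
  rw [PySem.List.foldl_count_if (fun p => (pvCell gA p.1 p.2).isSome) (pvCells n m) 0]
  have hcnt : (pvCells n m).countP (fun p => (pvCell gA p.1 p.2).isSome)
      = (pvCells n m).countP (fun p => decide (p ∈ d.keys)) := by
    apply List.countP_congr
    intro p hp
    have hin : pvInR n m p.1 p.2 = true := pvMem_cells.mp hp
    rw [hEq p.1 p.2 hin]
    have hpp : ((p.1, p.2) : Int × Int) = p := rfl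
    rw [hpp, ← PySem.Dict.contains_eq_isSome_get?]
    constructor
    · intro h; simpa using (PySem.Dict.contains_iff_mem_keys d p).mp h
    · intro h
      exact (PySem.Dict.contains_iff_mem_keys d p).mpr (by simpa using h)
  rw [hcnt]
  have hperm : ((pvCells n m).filter (fun p => decide (p ∈ d.keys))).Perm d.keys := by
    rw [List.perm_ext_iff_of_nodup (pvCells_nodup.filter _) hnd]
    intro p
    simp only [List.mem_filter, decide_eq_true_eq]
    constructor
    · rintro ⟨-, h⟩; exact h
    · intro h; exact ⟨hsub p h, h⟩
  have hlen : (pvCells n m).countP (fun p => decide (p ∈ d.keys)) = d.keys.length := by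
    rw [List.countP_eq_length_filter]
    exact hperm.length_eq
  rw [hlen]
  have : d.keys.length = PySem.Dict.size d := by
    simp [PySem.Dict.keys, PySem.Dict.size]
  rw [this]
  ring

-- ---- the initial dict matches the initial grid ----
lemma pvInit_eq {storage : List String} (hrows : ∀ s ∈ storage, (storage.headD "").length ≤ s.length) :
    let n := storage.length
    let m := (storage.headD "").length
    let g0 : List (List (Option Char)) := storage.map fun s => s.toList.map some
    let d0 : PySem.Dict (Int × Int) Char := PySem.Dict.ofList
      ((List.range n).flatMap fun (r : Nat) => (List.range m).map fun (c : Nat) =>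
        (((r : Int), (c : Int)), ((storage.getD r "").toList).getD c ' '))
    pvGridOk n m g0 ∧ d0.keys.Nodup ∧ (∀ p ∈ d0.keys, p ∈ pvCells n m) ∧
      ∀ r c : Int, pvInR n m r c = true → pvCell g0 r c = d0.get? (r, c) := by
  intro n m g0 d0
  set ps := ((List.range n).flatMap fun (r : Nat) => (List.range m).map fun (c : Nat) =>
      (((r : Int), (c : Int)), ((storage.getD r "").toList).getD c ' ')) with hps
  have hmapfst : ps.map Prod.fst = pvCells n m := by
    simp [hps, pvCells, List.map_flatMap, List.map_map, Function.comp_def]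
  have hitems : d0.items = ps := by
    have h := PySem.Dict.items_foldl_insert_fresh ps Prod.fst Prod.snd PySem.Dict.empty
      (by intro a _; exact PySem.Dict.contains_empty _)
      (by rw [hmapfst]; exact pvCells_nodup)
    have : d0 = ps.foldl (fun d a => d.insert a.1 a.2) PySem.Dict.empty := rfl
    rw [this, h]
    simp [PySem.Dict.empty]
  have hkeys : d0.keys = pvCells n m := by
    show d0.items.map Prod.fst = pvCells n m
    rw [hitems, hmapfst]
  have hg0 : pvGridOk n m g0 := by
    refine ⟨by simp [g0]; rfl, ?_⟩
    intro row hrow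
    obtain ⟨str, hstr, rfl⟩ := List.mem_map.mp hrow
    simp only [List.length_map, String.length_toList]
    exact hrows str hstr
  refine ⟨hg0, by rw [hkeys]; exact pvCells_nodup, by rw [hkeys]; intro p hp; exact hp, ?_⟩
  intro r c hin
  have hb := hin
  simp only [pvInR, decide_eq_true_eq] at hb
  have hrn : r.toNat < n := by omega
  have hcm : c.toNat < m := by omega
  have hrow : storage[r.toNat]? = some storage[r.toNat] := List.getElem?_eq_getElem hrn
  have hrl : m ≤ storage[r.toNat].length := hrows _ (List.getElem_mem hrn)
  have hcl : c.toNat < storage[r.toNat].toList.length := by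
    rw [String.length_toList]; omega
  -- the grid side
  have hcellg : pvCell g0 r c = some storage[r.toNat].toList[c.toNat] := by
    simp only [pvCell, g0, List.getElem?_map, hrow, Option.map_some, Option.getD_some]
    rw [List.getElem?_eq_getElem hcl]
    simp
  -- the dict side
  have hmemps : (((r.toNat : Int), (c.toNat : Int)), storage[r.toNat].toList[c.toNat]) ∈ ps := by
    rw [hps]
    simp only [List.mem_flatMap, List.mem_map, List.mem_range]
    refine ⟨r.toNat, hrn, c.toNat, hcm, ?_⟩
    congr 1
    rw [List.getD_eq_getElem?_getD, List.getD_eq_getElem?_getD]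
    rw [List.getElem?_eq_getElem hrn]
    simp only [Option.getD_some]
    rw [List.getElem?_eq_getElem hcl]
    simp
  have e1 : ((r.toNat : Int)) = r := by omega
  have e2 : ((c.toNat : Int)) = c := by omega
  rw [e1, e2] at hmemps
  have hget : d0.get? (r, c) = some storage[r.toNat].toList[c.toNat] := by
    apply PySem.Dict.get?_of_mem_items
    · rw [hitems]; exact hmemps
    · rw [hkeys]; exact pvCells_nodup
  rw [hcellg, hget]

-- ===== VERDICT (by name: the statement is the Claim_ definition above) =====
theorem solution_spec : Claim_equal_solution := by
  intro storage requests hDom hPre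
  obtain ⟨hne, hrows, hreqs⟩ := hPre
  unfold Spec_solution
  simp only [solution, solution_alt]
  obtain ⟨hg0, hnd0, hsub0, hEq0⟩ := pvInit_eq hrows
  have hreq' : ∀ req ∈ requests, req ≠ "" ∨ (storage.headD "").length = 0 := by
    rcases hreqs with h | h
    · exact fun req hq => Or.inl (h req hq)
    · exact fun req _ => Or.inr h
  obtain ⟨hndF, hsubF, hEqF⟩ := pvFold_steps requests hreq' hg0 hnd0 hsub0 hEq0
  exact pvCount_eq hndF hsubF hEqF
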